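-- pv_equiv track=rewrite | github.com/WeixinWang24/ORBIT | src/orbit/knowledge/retrieval.py | _preferred_note_types
-- ===== SOURCE A (Python) =====
-- def _preferred_note_types(tokens: list[str]) -> list[str]:
--     preferred: list[str] = []
--     if any(token in {"project", "orbit"} for token in tokens):
--         preferred.append("project")
--     if any(token in {"decision", "decisions", "why"} for token in tokens):
--         preferred.append("decision")
--     if any(token in {"procedure", "procedures", "workflow", "steps", "step", "guide", "guidance", "how"} for token in tokens):
--         preferred.append("procedure")
--     if any(token in {"principle", "principles"} for token in tokens):
--         preferred.append("principle")
--     if any(token in {"episode", "history", "context"} for token in tokens):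
--         preferred.append("episode")
--     deduped: list[str] = []
--     for item in preferred:
--         if item not in deduped:
--             deduped.append(item)
--     return deduped
-- ===== SOURCE B (Python) =====
-- _KEYWORD_TO_CATEGORY = {
--     "project": "project",
--     "orbit": "project",
--     "decision": "decision",
--     "decisions": "decision",
--     "why": "decision",
--     "procedure": "procedure",
--     "procedures": "procedure",
--     "workflow": "procedure",
--     "steps": "procedure",
--     "step": "procedure",
--     "guide": "procedure",
--     "guidance": "procedure",
--     "how": "procedure",
--     "principle": "principle",
--     "principles": "principle",
--     "episode": "episode",
--     "history": "episode",
--     "context": "episode",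
-- }
--
-- _CATEGORY_ORDER = ["project", "decision", "procedure", "principle", "episode"]
--
--
-- def _preferred_note_types(tokens: list[str]) -> list[str]:
--     found = set()
--     for token in tokens:
--         category = _KEYWORD_TO_CATEGORY.get(token)
--         if category is not None:
--             found.add(category)
--     return [category for category in _CATEGORY_ORDER if category in found]
-- ===== Notes on version B (the rewrite author's own statement) =====
-- stated objective: faster
-- what changed: Replaces five separate any-scans over the token list plus a dedup pass with a single pass over the tokens driven by one keyword-to-category lookup dict collecting categories into a set, then emits the fixed category order filtered by membership.
import Mathlib
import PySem

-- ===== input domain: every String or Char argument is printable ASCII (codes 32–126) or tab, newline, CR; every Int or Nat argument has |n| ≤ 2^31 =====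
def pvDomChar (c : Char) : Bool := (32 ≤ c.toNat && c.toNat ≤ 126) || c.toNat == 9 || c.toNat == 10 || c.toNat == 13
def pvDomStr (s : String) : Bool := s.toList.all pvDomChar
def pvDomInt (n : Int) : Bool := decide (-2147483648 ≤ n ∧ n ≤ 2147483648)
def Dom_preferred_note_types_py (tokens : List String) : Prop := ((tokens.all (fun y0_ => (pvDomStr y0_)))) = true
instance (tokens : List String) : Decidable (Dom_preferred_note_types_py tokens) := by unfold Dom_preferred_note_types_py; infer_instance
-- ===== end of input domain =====

-- B replaces A's five any-scans plus a dedup pass by one keyword-to-category dict lookup in a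
-- single token pass collecting into a set, then filters the fixed category order (idiomatic).

-- ===== PORT A =====
def preferred_note_types_py (tokens : List String) : List String :=
  let preferred : List String := []
  let preferred := if tokens.any (fun token => ["project", "orbit"].contains token)
    then preferred ++ ["project"] else preferred
  let preferred := if tokens.any (fun token => ["decision", "decisions", "why"].contains token)
    then preferred ++ ["decision"] else preferred
  let preferred := if tokens.any (fun token =>
      ["procedure", "procedures", "workflow", "steps", "step", "guide", "guidance", "how"].contains token)
    then preferred ++ ["procedure"] else preferred
  let preferred := if tokens.any (fun token => ["principle", "principles"].contains token)
    then preferred ++ ["principle"] else preferred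
  let preferred := if tokens.any (fun token => ["episode", "history", "context"].contains token)
    then preferred ++ ["episode"] else preferred
  let deduped : List String :=
    preferred.foldl (fun deduped item => if deduped.contains item then deduped else deduped ++ [item]) []
  deduped

-- ===== PORT B =====
def pvKeywordToCategory : PySem.Dict String String := PySem.Dict.ofList
  [("project", "project"), ("orbit", "project"),
   ("decision", "decision"), ("decisions", "decision"), ("why", "decision"),
   ("procedure", "procedure"), ("procedures", "procedure"), ("workflow", "procedure"),
   ("steps", "procedure"), ("step", "procedure"), ("guide", "procedure"),
   ("guidance", "procedure"), ("how", "procedure"),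
   ("principle", "principle"), ("principles", "principle"),
   ("episode", "episode"), ("history", "episode"), ("context", "episode")]

def pvCategoryOrder : List String := ["project", "decision", "procedure", "principle", "episode"]

def preferred_note_types_py_alt (tokens : List String) : List String :=
  let found : PySem.Set String := tokens.foldl (fun found token =>
    match pvKeywordToCategory.get? token with
    | some category => PySem.Set.add found category
    | none => found) PySem.Set.empty
  pvCategoryOrder.filter (fun category => PySem.Set.contains found category)

-- ===== PRECONDITION & SPEC =====
def Spec_preferred_note_types_py (tokens : List String) (out : List String) : Prop := out = preferred_note_types_py_alt tokens
instance (tokens : List String) (out : List String) : Decidable (Spec_preferred_note_types_py tokens out) := by unfold Spec_preferred_note_types_py; infer_instance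

-- ===== CLAIM (what is proved, stated in full; the proofs are below) =====
def Claim_equal_preferred_note_types_py : Prop := ∀ (tokens : List String), Dom_preferred_note_types_py tokens → Spec_preferred_note_types_py tokens (preferred_note_types_py tokens)

-- ===== LEMMAS AND PROOFS =====

-- Set.add membership (PySem.Set over String)
theorem contains_set_add (s : PySem.Set String) (x c : String) :
    (PySem.Set.add s x).contains c = (PySem.Set.contains s c || x == c) := by
  simp only [PySem.Set.add]
  split_ifs with hx <;> by_cases hc : x = c
  · subst hc; simp_all [PySem.Set.contains, List.contains_eq_mem]
  · simp [hc]
  · subst hc; simp [PySem.Set.contains, List.contains_eq_mem, List.mem_append]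
  · simp [hc, Ne.symm hc, PySem.Set.contains, List.contains_eq_mem, List.mem_append]

-- the literal dict, as its underlying association list
theorem pvKeywordToCategory_eq : pvKeywordToCategory = PySem.Dict.mk
  [("project", "project"), ("orbit", "project"),
   ("decision", "decision"), ("decisions", "decision"), ("why", "decision"),
   ("procedure", "procedure"), ("procedures", "procedure"), ("workflow", "procedure"),
   ("steps", "procedure"), ("step", "procedure"), ("guide", "procedure"),
   ("guidance", "procedure"), ("how", "procedure"),
   ("principle", "principle"), ("principles", "principle"),
   ("episode", "episode"), ("history", "episode"), ("context", "episode")] := by rfl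

theorem get?_nil_str (t : String) : (PySem.Dict.mk ([] : List (String × String))).get? t = none := by
  simp [PySem.Dict.get?]

theorem get?_beq_cons (k v : String) (rest : List (String × String)) (t c : String) :
    ((PySem.Dict.mk ((k, v) :: rest)).get? t == some c)
      = ((k == t) && (v == c) || !(k == t) && ((PySem.Dict.mk rest).get? t == some c)) := by
  rw [PySem.Dict.get?_mk_cons]
  by_cases h : (k == t) = true <;> simp [h]

-- membership in B's accumulated set = "some token looks up to this category"
theorem contains_found (tokens : List String) (s : PySem.Set String) (c : String) :
    PySem.Set.contains
      (tokens.foldl (fun found token =>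
        match pvKeywordToCategory.get? token with
        | some category => PySem.Set.add found category
        | none => found) s) c
      = (PySem.Set.contains s c || tokens.any (fun t => pvKeywordToCategory.get? t == some c)) := by
  induction tokens generalizing s with
  | nil => simp
  | cons t ts ih =>
    simp only [List.foldl_cons, List.any_cons]
    cases h : pvKeywordToCategory.get? t with
    | none =>
      simp only [h]
      rw [ih]
      simp
    | some cat =>
      simp only [h]
      rw [ih, contains_set_add]
      simp [Bool.or_assoc]

-- get? on the literal dict, category by category
theorem lookup_project (t : String) :
    (pvKeywordToCategory.get? t == some "project") = (["project", "orbit"].contains t) := by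
  by_cases h0 : t = "project"
  · subst h0; decide
  by_cases h1 : t = "orbit"
  · subst h1; decide
  by_cases h2 : t = "decision"
  · subst h2; decide
  by_cases h3 : t = "decisions"
  · subst h3; decide
  by_cases h4 : t = "why"
  · subst h4; decide
  by_cases h5 : t = "procedure"
  · subst h5; decide
  by_cases h6 : t = "procedures"
  · subst h6; decide
  by_cases h7 : t = "workflow"
  · subst h7; decide
  by_cases h8 : t = "steps"
  · subst h8; decide
  by_cases h9 : t = "step"
  · subst h9; decide
  by_cases h10 : t = "guide"
  · subst h10; decide
  by_cases h11 : t = "guidance"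
  · subst h11; decide
  by_cases h12 : t = "how"
  · subst h12; decide
  by_cases h13 : t = "principle"
  · subst h13; decide
  by_cases h14 : t = "principles"
  · subst h14; decide
  by_cases h15 : t = "episode"
  · subst h15; decide
  by_cases h16 : t = "history"
  · subst h16; decide
  by_cases h17 : t = "context"
  · subst h17; decide
  simp [pvKeywordToCategory_eq, get?_beq_cons, get?_nil_str, h0, h1, h2, h3, h4, h5, h6, h7, h8, h9, h10, h11, h12, h13, h14, h15, h16, h17,
    Ne.symm h0, Ne.symm h1, Ne.symm h2, Ne.symm h3, Ne.symm h4, Ne.symm h5, Ne.symm h6, Ne.symm h7, Ne.symm h8, Ne.symm h9, Ne.symm h10, Ne.symm h11, Ne.symm h12, Ne.symm h13, Ne.symm h14, Ne.symm h15, Ne.symm h16, Ne.symm h17]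

theorem lookup_decision (t : String) :
    (pvKeywordToCategory.get? t == some "decision") = (["decision", "decisions", "why"].contains t) := by
  by_cases h0 : t = "project"
  · subst h0; decide
  by_cases h1 : t = "orbit"
  · subst h1; decide
  by_cases h2 : t = "decision"
  · subst h2; decide
  by_cases h3 : t = "decisions"
  · subst h3; decide
  by_cases h4 : t = "why"
  · subst h4; decide
  by_cases h5 : t = "procedure"
  · subst h5; decide
  by_cases h6 : t = "procedures"
  · subst h6; decide
  by_cases h7 : t = "workflow"
  · subst h7; decide
  by_cases h8 : t = "steps"
  · subst h8; decide
  by_cases h9 : t = "step"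
  · subst h9; decide
  by_cases h10 : t = "guide"
  · subst h10; decide
  by_cases h11 : t = "guidance"
  · subst h11; decide
  by_cases h12 : t = "how"
  · subst h12; decide
  by_cases h13 : t = "principle"
  · subst h13; decide
  by_cases h14 : t = "principles"
  · subst h14; decide
  by_cases h15 : t = "episode"
  · subst h15; decide
  by_cases h16 : t = "history"
  · subst h16; decide
  by_cases h17 : t = "context"
  · subst h17; decide
  simp [pvKeywordToCategory_eq, get?_beq_cons, get?_nil_str, h0, h1, h2, h3, h4, h5, h6, h7, h8, h9, h10, h11, h12, h13, h14, h15, h16, h17,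
    Ne.symm h0, Ne.symm h1, Ne.symm h2, Ne.symm h3, Ne.symm h4, Ne.symm h5, Ne.symm h6, Ne.symm h7, Ne.symm h8, Ne.symm h9, Ne.symm h10, Ne.symm h11, Ne.symm h12, Ne.symm h13, Ne.symm h14, Ne.symm h15, Ne.symm h16, Ne.symm h17]

theorem lookup_procedure (t : String) :
    (pvKeywordToCategory.get? t == some "procedure") = (["procedure", "procedures", "workflow", "steps", "step", "guide", "guidance", "how"].contains t) := by
  by_cases h0 : t = "project"
  · subst h0; decide
  by_cases h1 : t = "orbit"
  · subst h1; decide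
  by_cases h2 : t = "decision"
  · subst h2; decide
  by_cases h3 : t = "decisions"
  · subst h3; decide
  by_cases h4 : t = "why"
  · subst h4; decide
  by_cases h5 : t = "procedure"
  · subst h5; decide
  by_cases h6 : t = "procedures"
  · subst h6; decide
  by_cases h7 : t = "workflow"
  · subst h7; decide
  by_cases h8 : t = "steps"
  · subst h8; decide
  by_cases h9 : t = "step"
  · subst h9; decide
  by_cases h10 : t = "guide"
  · subst h10; decide
  by_cases h11 : t = "guidance"
  · subst h11; decide
  by_cases h12 : t = "how"
  · subst h12; decide
  by_cases h13 : t = "principle"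
  · subst h13; decide
  by_cases h14 : t = "principles"
  · subst h14; decide
  by_cases h15 : t = "episode"
  · subst h15; decide
  by_cases h16 : t = "history"
  · subst h16; decide
  by_cases h17 : t = "context"
  · subst h17; decide
  simp [pvKeywordToCategory_eq, get?_beq_cons, get?_nil_str, h0, h1, h2, h3, h4, h5, h6, h7, h8, h9, h10, h11, h12, h13, h14, h15, h16, h17,
    Ne.symm h0, Ne.symm h1, Ne.symm h2, Ne.symm h3, Ne.symm h4, Ne.symm h5, Ne.symm h6, Ne.symm h7, Ne.symm h8, Ne.symm h9, Ne.symm h10, Ne.symm h11, Ne.symm h12, Ne.symm h13, Ne.symm h14, Ne.symm h15, Ne.symm h16, Ne.symm h17]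

theorem lookup_principle (t : String) :
    (pvKeywordToCategory.get? t == some "principle") = (["principle", "principles"].contains t) := by
  by_cases h0 : t = "project"
  · subst h0; decide
  by_cases h1 : t = "orbit"
  · subst h1; decide
  by_cases h2 : t = "decision"
  · subst h2; decide
  by_cases h3 : t = "decisions"
  · subst h3; decide
  by_cases h4 : t = "why"
  · subst h4; decide
  by_cases h5 : t = "procedure"
  · subst h5; decide
  by_cases h6 : t = "procedures"
  · subst h6; decide
  by_cases h7 : t = "workflow"
  · subst h7; decide
  by_cases h8 : t = "steps"
  · subst h8; decide
  by_cases h9 : t = "step"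
  · subst h9; decide
  by_cases h10 : t = "guide"
  · subst h10; decide
  by_cases h11 : t = "guidance"
  · subst h11; decide
  by_cases h12 : t = "how"
  · subst h12; decide
  by_cases h13 : t = "principle"
  · subst h13; decide
  by_cases h14 : t = "principles"
  · subst h14; decide
  by_cases h15 : t = "episode"
  · subst h15; decide
  by_cases h16 : t = "history"
  · subst h16; decide
  by_cases h17 : t = "context"
  · subst h17; decide
  simp [pvKeywordToCategory_eq, get?_beq_cons, get?_nil_str, h0, h1, h2, h3, h4, h5, h6, h7, h8, h9, h10, h11, h12, h13, h14, h15, h16, h17,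
    Ne.symm h0, Ne.symm h1, Ne.symm h2, Ne.symm h3, Ne.symm h4, Ne.symm h5, Ne.symm h6, Ne.symm h7, Ne.symm h8, Ne.symm h9, Ne.symm h10, Ne.symm h11, Ne.symm h12, Ne.symm h13, Ne.symm h14, Ne.symm h15, Ne.symm h16, Ne.symm h17]

theorem lookup_episode (t : String) :
    (pvKeywordToCategory.get? t == some "episode") = (["episode", "history", "context"].contains t) := by
  by_cases h0 : t = "project"
  · subst h0; decide
  by_cases h1 : t = "orbit"
  · subst h1; decide
  by_cases h2 : t = "decision"
  · subst h2; decide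
  by_cases h3 : t = "decisions"
  · subst h3; decide
  by_cases h4 : t = "why"
  · subst h4; decide
  by_cases h5 : t = "procedure"
  · subst h5; decide
  by_cases h6 : t = "procedures"
  · subst h6; decide
  by_cases h7 : t = "workflow"
  · subst h7; decide
  by_cases h8 : t = "steps"
  · subst h8; decide
  by_cases h9 : t = "step"
  · subst h9; decide
  by_cases h10 : t = "guide"
  · subst h10; decide
  by_cases h11 : t = "guidance"
  · subst h11; decide
  by_cases h12 : t = "how"
  · subst h12; decide
  by_cases h13 : t = "principle"
  · subst h13; decide
  by_cases h14 : t = "principles"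
  · subst h14; decide
  by_cases h15 : t = "episode"
  · subst h15; decide
  by_cases h16 : t = "history"
  · subst h16; decide
  by_cases h17 : t = "context"
  · subst h17; decide
  simp [pvKeywordToCategory_eq, get?_beq_cons, get?_nil_str, h0, h1, h2, h3, h4, h5, h6, h7, h8, h9, h10, h11, h12, h13, h14, h15, h16, h17,
    Ne.symm h0, Ne.symm h1, Ne.symm h2, Ne.symm h3, Ne.symm h4, Ne.symm h5, Ne.symm h6, Ne.symm h7, Ne.symm h8, Ne.symm h9, Ne.symm h10, Ne.symm h11, Ne.symm h12, Ne.symm h13, Ne.symm h14, Ne.symm h15, Ne.symm h16, Ne.symm h17]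


-- ===== VERDICT (by name: the statement is the Claim_ definition above) =====
theorem preferred_note_types_py_spec : Claim_equal_preferred_note_types_py := by
  intro tokens _
  unfold Spec_preferred_note_types_py preferred_note_types_py preferred_note_types_py_alt
  simp only [pvCategoryOrder, List.filter, contains_found, PySem.Set.empty,
    lookup_project, lookup_decision, lookup_procedure, lookup_principle, lookup_episode,
    List.contains_nil, Bool.false_or]
  cases h1 : tokens.any (fun token => ["project", "orbit"].contains token) <;>
  cases h2 : tokens.any (fun token => ["decision", "decisions", "why"].contains token) <;>
  cases h3 : tokens.any (fun token =>
    ["procedure", "procedures", "workflow", "steps", "step", "guide", "guidance", "how"].contains token) <;>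
  cases h4 : tokens.any (fun token => ["principle", "principles"].contains token) <;>
  cases h5 : tokens.any (fun token => ["episode", "history", "context"].contains token) <;>
  simp
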